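-- pv_equiv track=rewrite | github.com/Abecarne/Epitech | Year_2/MATHS/B-MAT-400-LIL-4-1-202unsold-simon.auduberteau/calculs.py | getTabMarginalLawX
-- ===== SOURCE A (Python) =====
-- def getTabMarginalLawX(tab):
--     marginalX = []
--     for i in range(len(tab)):
--         somme = 0
--         for j in range(len(tab)):
--             somme += tab[j][i]
--         marginalX += [somme]
--     return marginalX
-- ===== SOURCE B (Python) =====
-- def getTabMarginalLawX(tab):
--     n = len(tab)
--     acc = [0] * n
--     for row in tab:
--         acc = [a + b for a, b in zip(acc, row[:n], strict=True)]
--     return acc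
-- ===== Notes on version B (the rewrite author's own statement) =====
-- stated objective: alternative
-- what changed: B has no index arithmetic and no nested range loops: it folds strict elementwise vector addition (zip of the running partial-sum vector with each row's first n entries) over the rows, rebuilding the accumulator functionally per row, instead of A's column-major nested index loops that complete each column sum before the next.
import Mathlib
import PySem

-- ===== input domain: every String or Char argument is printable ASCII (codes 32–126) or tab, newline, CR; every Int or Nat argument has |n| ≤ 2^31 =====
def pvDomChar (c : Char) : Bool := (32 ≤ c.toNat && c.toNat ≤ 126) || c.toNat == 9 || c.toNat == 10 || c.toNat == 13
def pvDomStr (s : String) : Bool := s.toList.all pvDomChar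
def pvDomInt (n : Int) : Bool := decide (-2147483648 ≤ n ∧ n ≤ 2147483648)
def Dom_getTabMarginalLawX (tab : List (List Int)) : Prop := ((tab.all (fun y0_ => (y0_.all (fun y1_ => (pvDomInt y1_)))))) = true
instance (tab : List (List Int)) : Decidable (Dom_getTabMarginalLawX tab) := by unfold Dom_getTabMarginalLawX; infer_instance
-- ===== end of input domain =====

-- B folds strict elementwise vector addition (zip) of the running partial-sum vector with each
-- row's first n entries, instead of A's nested range-index loops; same cost, different decomposition.

-- ===== PORT A =====
def getTabMarginalLawX (tab : List (List Int)) : List Int :=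
  (PySem.List.pyRange 0 tab.length 1).foldl (fun marginalX i =>
    marginalX ++ [(PySem.List.pyRange 0 tab.length 1).foldl
      (fun somme j => somme + PySem.List.pyGetD (PySem.List.pyGetD tab j []) i 0) 0]) []

-- ===== PORT B =====
-- zip(..., strict=True) only RAISES on a length mismatch (those inputs are outside Pre_);
-- wherever Python B returns it is a plain zip, so this port is exact there.
def getTabMarginalLawX_alt (tab : List (List Int)) : List Int :=
  tab.foldl (fun acc row =>
      ((acc.zip (PySem.List.slice row none (some (tab.length : Int)))).map (fun p => p.1 + p.2)))
    (List.replicate tab.length 0)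

-- ===== PRECONDITION & SPEC =====
-- Pre_ excludes ragged tables containing a row shorter than the number of rows: there A's
-- tab[j][i] raises IndexError in Python (and B's strict zip raises ValueError).
def Pre_getTabMarginalLawX (tab : List (List Int)) : Prop :=
  ∀ row ∈ tab, tab.length ≤ row.length
instance (tab : List (List Int)) : Decidable (Pre_getTabMarginalLawX tab) := by
  unfold Pre_getTabMarginalLawX; infer_instance
def pvWitness_getTabMarginalLawX : List (List Int) := [[1, 2], [3, 4]]

def Spec_getTabMarginalLawX (tab : List (List Int)) (out : List Int) : Prop := out = getTabMarginalLawX_alt tab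
instance (tab : List (List Int)) (out : List Int) : Decidable (Spec_getTabMarginalLawX tab out) := by unfold Spec_getTabMarginalLawX; infer_instance

-- ===== CLAIM (what is proved, stated in full; the proofs are below) =====
def Claim_equal_getTabMarginalLawX : Prop := ∀ (tab : List (List Int)), Dom_getTabMarginalLawX tab → Pre_getTabMarginalLawX tab → Spec_getTabMarginalLawX tab (getTabMarginalLawX tab)

-- ===== LEMMAS AND PROOFS =====

-- column sum: Σ_j tab[j][i] (total form; agrees with Python inside Pre_)
def pvColSum (tab : List (List Int)) (i : Int) : Int :=
  tab.foldl (fun s row => s + PySem.List.pyGetD row i 0) 0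

theorem pvColSum_cons (r : List Int) (rows : List (List Int)) (i : Int) :
    pvColSum (r :: rows) i = PySem.List.pyGetD r i 0 + pvColSum rows i := by
  simp [pvColSum, List.foldl_cons, PySem.List.foldl_add]

-- A computes exactly the list of column sums
theorem pvA_eq (tab : List (List Int)) :
    getTabMarginalLawX tab = (PySem.List.pyRange 0 tab.length 1).map (pvColSum tab) := by
  unfold getTabMarginalLawX
  rw [PySem.List.foldl_append_singleton_eq_map]
  simp only [List.nil_append]
  refine List.map_congr_left (fun i _ => ?_)
  exact PySem.List.foldl_pyRange_zero_pyGetD tab [] (fun s row => s + PySem.List.pyGetD row i 0) 0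

-- the comprehension over a zip is zipWith
theorem pvZip_map (acc r : List Int) :
    (acc.zip r).map (fun p => p.1 + p.2) = List.zipWith (· + ·) acc r := by
  induction acc generalizing r with
  | nil => simp
  | cons a acc ih => cases r <;> simp [ih]

-- B's fold maintains the vector of partial column sums
theorem pvB_fold (n : ℕ) :
    ∀ (rows : List (List Int)) (acc : List Int), acc.length = n →
    (∀ r ∈ rows, n ≤ r.length) →
    rows.foldl (fun a r => List.zipWith (· + ·) a (r.take n)) acc
      = (PySem.List.pyRange 0 (n : Int) 1).map
          (fun i => PySem.List.pyGetD acc i 0 + pvColSum rows i) := by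
  intro rows
  induction rows with
  | nil =>
    intro acc hlen _
    simp only [List.foldl_nil, pvColSum, add_zero]
    rw [show (n : Int) = (acc.length : Int) by rw [hlen]]
    exact (PySem.List.map_pyGetD_pyRange_zero acc 0).symm
  | cons r rows ih =>
    intro acc hlen hrows
    rw [List.foldl_cons]
    have hr : n ≤ r.length := hrows r (by simp)
    have hlen' : (List.zipWith (· + ·) acc (r.take n)).length = n := by
      simp [List.length_zipWith]; omega
    rw [ih _ hlen' (fun r' hr' => hrows r' (by simp [hr']))]
    refine List.map_congr_left (fun i hi => ?_)
    have hi' := (PySem.List.mem_pyRange_one).1 hi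
    lift i to ℕ using hi'.1 with k
    have hk : k < n := by exact_mod_cast hi'.2
    have h1 : PySem.List.pyGetD (List.zipWith (· + ·) acc (r.take n)) (k : Int) 0
        = PySem.List.pyGetD acc (k : Int) 0 + PySem.List.pyGetD r (k : Int) 0 := by
      rw [PySem.List.pyGetD_natCast, PySem.List.pyGetD_natCast, PySem.List.pyGetD_natCast]
      have hka : k < acc.length := by omega
      have hkr : k < r.length := by omega
      have hkz : k < (List.zipWith (· + ·) acc (r.take n)).length := by
        simp [List.length_zipWith]; omega
      rw [List.getD_eq_getElem?_getD, List.getElem?_eq_getElem hkz, List.getElem_zipWith,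
        List.getElem_take]
      simp [List.getD_eq_getElem?_getD, hka, hkr]
    rw [h1, pvColSum_cons, add_assoc]

theorem pvGetD_replicate_zero (n : ℕ) (i : Int) :
    PySem.List.pyGetD (List.replicate n (0 : Int)) i 0 = 0 := by
  rcases h : PySem.List.pyGet? (List.replicate n (0 : Int)) i with _ | x
  · simp [PySem.List.pyGetD, h]
  · have hx : x ∈ List.replicate n (0 : Int) := by
      apply PySem.List.mem_of_pyGet?_eq_some
      exact h
    simp [PySem.List.pyGetD, h, List.eq_of_mem_replicate hx]

theorem pvB_eq (tab : List (List Int)) (hpre : Pre_getTabMarginalLawX tab) :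
    getTabMarginalLawX_alt tab = (PySem.List.pyRange 0 tab.length 1).map (pvColSum tab) := by
  unfold getTabMarginalLawX_alt
  have hfun : (fun (acc : List Int) (row : List Int) =>
        ((acc.zip (PySem.List.slice row none (some (tab.length : Int)))).map (fun p => p.1 + p.2)))
      = fun acc row => List.zipWith (· + ·) acc (row.take tab.length) := by
    funext acc row
    rw [PySem.List.slice_to_natCast]
    exact pvZip_map acc (row.take tab.length)
  rw [hfun, pvB_fold tab.length tab (List.replicate tab.length 0) (by simp) hpre]
  simp [pvGetD_replicate_zero]

-- ===== VERDICT (by name: the statement is the Claim_ definition above) =====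
theorem getTabMarginalLawX_spec : Claim_equal_getTabMarginalLawX := by
  intro tab _ hpre
  unfold Spec_getTabMarginalLawX
  rw [pvA_eq, pvB_eq tab hpre]
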